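-- pv_equiv track=rewrite | github.com/shinkeonkim/boj-solution-archiving-site | data/source/9313_70946488.py | f
-- ===== SOURCE A (Python) =====
-- def f(n):
--   l = []
--
--   while n > 0:
--     l.append(n % 2)
--     n //= 2
--   while len(l) < 32:
--     l.append(0)
--
--   ret = 0
--   z = 1
--   for i in l[::-1]:
--     ret += i * z
--     z *= 2
--   return ret
-- ===== SOURCE B (Python) =====
-- def f(n):
--     if n <= 0:
--         return 0
--     ret = 0
--     m = n
--     for _ in range(max(32, n.bit_length())):
--         ret = 2 * ret + m % 2
--         m //= 2
--     return ret
-- ===== Notes on version B (the rewrite author's own statement) =====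
-- stated objective: simpler
-- what changed: Replaces A's three phases (build a bit list, pad it to 32, reverse-and-reweight it) with a single loop that folds each low bit directly into an integer accumulator (ret = 2*ret + m%2), with no list at all.
import Mathlib
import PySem

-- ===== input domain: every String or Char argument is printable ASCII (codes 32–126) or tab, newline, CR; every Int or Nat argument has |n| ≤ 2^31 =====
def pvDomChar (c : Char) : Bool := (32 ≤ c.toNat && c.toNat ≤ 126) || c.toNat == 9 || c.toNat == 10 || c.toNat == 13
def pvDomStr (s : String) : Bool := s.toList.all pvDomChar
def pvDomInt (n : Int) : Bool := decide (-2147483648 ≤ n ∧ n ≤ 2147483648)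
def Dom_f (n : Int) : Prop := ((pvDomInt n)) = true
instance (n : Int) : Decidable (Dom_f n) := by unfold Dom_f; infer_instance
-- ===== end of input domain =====

-- B replaces A's build-pad-reverse bit list with a single accumulator loop (ret = 2*ret + m%2); simpler, same result.

-- ===== PORT A =====
-- while n > 0: l.append(n % 2); n //= 2
def fBits (n : Int) : List Int :=
  if h : 0 < n then PySem.Int.mod n 2 :: fBits (PySem.Int.floordiv n 2) else []
termination_by n.toNat
decreasing_by
  rw [PySem.Int.floordiv_eq_ediv_of_pos (by omega)]; omega

-- while len(l) < 32: l.append(0)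
def fPad (l : List Int) : List Int :=
  if l.length < 32 then fPad (l ++ [0]) else l
termination_by 32 - l.length
decreasing_by
  simp; omega

def f (n : Int) : Int :=
  -- for i in l[::-1]: ret += i * z; z *= 2   (l = fPad (fBits n) inlined)
  (((PySem.List.slice? (fPad (fBits n)) none none (-1)).getD []).foldl
      (fun (p : Int × Int) i => (p.1 + i * p.2, p.2 * 2)) (0, 1)).1

-- ===== PORT B =====
def f_alt (n : Int) : Int :=
  if n ≤ 0 then 0
  else
    (((List.range (max 32 (PySem.Int.bitLength n))).foldl
        (fun (p : Int × Int) _ => (2 * p.1 + PySem.Int.mod p.2 2, PySem.Int.floordiv p.2 2))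
        (0, n))).1

-- ===== PRECONDITION & SPEC =====
def Spec_f (n : Int) (out : Int) : Prop := out = f_alt n
instance (n : Int) (out : Int) : Decidable (Spec_f n out) := by unfold Spec_f; infer_instance

-- ===== CLAIM (what is proved, stated in full; the proofs are below) =====
def Claim_equal_f : Prop := ∀ (n : Int), Dom_f n → Spec_f n (f n)

-- ===== LEMMAS AND PROOFS =====

-- value of an LSB-first bit list
def ofBitsLE (l : List Int) : Int := l.foldr (fun b a => b + 2 * a) 0

-- MSB-first bit list of m, w bits (a specification device shared by both reductions)
def bitsL (m : Int) : Nat → List Int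
  | 0 => []
  | w + 1 => PySem.Int.mod m 2 :: bitsL (PySem.Int.floordiv m 2) w

theorem bitsL_length (m : Int) (w : Nat) : (bitsL m w).length = w := by
  induction w generalizing m with
  | zero => rfl
  | succ w ih => simp [bitsL, ih]

theorem ofBitsLE_append_single (xs : List Int) (b : Int) :
    ofBitsLE (xs ++ [b]) = ofBitsLE xs + b * 2 ^ xs.length := by
  induction xs with
  | nil => simp [ofBitsLE]
  | cons x xs ih =>
    simp [ofBitsLE, List.foldr] at ih ⊢
    rw [ih]; ring

theorem foldA_eq (l : List Int) : ∀ ret z : Int,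
    (l.foldl (fun (p : Int × Int) i => (p.1 + i * p.2, p.2 * 2)) (ret, z)).1
      = ret + z * ofBitsLE l := by
  induction l with
  | nil => intro ret z; simp [ofBitsLE]
  | cons b l ih =>
    intro ret z
    simp only [List.foldl, ofBitsLE, List.foldr] at ih ⊢
    rw [ih]; ring

theorem f_eq (n : Int) : f n = ofBitsLE ((fPad (fBits n)).reverse) := by
  unfold f
  rw [PySem.List.slice?_none_none_neg_one, Option.getD_some, foldA_eq]
  ring

-- B's loop ignores the index, so expose it as an iterate
theorem foldB_eq (w : Nat) : ∀ ret m : Int,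
    ((List.range w).foldl
        (fun (p : Int × Int) _ => (2 * p.1 + PySem.Int.mod p.2 2, PySem.Int.floordiv p.2 2))
        (ret, m)).1
      = ret * 2 ^ w + ofBitsLE ((bitsL m w).reverse) := by
  induction w with
  | zero => intro ret m; simp [bitsL, ofBitsLE]
  | succ w ih =>
    intro ret m
    rw [List.range_succ_eq_map]
    simp only [List.foldl_cons, List.foldl_map]
    rw [ih]
    simp only [bitsL, List.reverse_cons, ofBitsLE_append_single,
      List.length_reverse, bitsL_length]
    ring

-- the padded bit list of A is exactly bitsL n w when 0 ≤ n < 2^w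
theorem pad_bits (w : Nat) : ∀ n : Int, 0 ≤ n → n < 2 ^ w →
    fBits n ++ List.replicate (w - (fBits n).length) 0 = bitsL n w := by
  induction w with
  | zero =>
    intro n h0 h1
    have : n = 0 := by omega
    subst this
    rw [fBits]; simp [bitsL]
  | succ w ih =>
    intro n h0 h1
    by_cases hp : 0 < n
    · rw [fBits, dif_pos hp]
      have hdn : 0 ≤ PySem.Int.floordiv n 2 := by
        rw [PySem.Int.floordiv_eq_ediv_of_pos (by omega)]; omega
      have hlt : PySem.Int.floordiv n 2 < 2 ^ w := by
        rw [PySem.Int.floordiv_lt_iff_lt_mul (by omega)]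
        calc n < 2 ^ (w + 1) := h1
          _ = 2 ^ w * 2 := by ring
      have := ih (PySem.Int.floordiv n 2) hdn hlt
      simp only [bitsL]
      rw [← this]
      simp [Nat.succ_sub_succ]
    · have : n = 0 := by omega
      subst this
      rw [fBits]
      simp only [dif_neg hp, List.nil_append, List.length_nil, Nat.sub_zero, bitsL]
      have h2 : PySem.Int.mod 0 2 = 0 := by decide
      have h3 : PySem.Int.floordiv 0 2 = 0 := by decide
      rw [h2, h3, ← ih 0 le_rfl (by positivity)]
      rw [fBits]
      simp [List.replicate_succ]

theorem fPad_eq (l : List Int) : fPad l = l ++ List.replicate (32 - l.length) 0 := by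
  induction l using fPad.induct with
  | case1 l h ih =>
    rw [fPad, if_pos h, ih]
    have : 32 - l.length = (32 - (l ++ [(0:Int)]).length) + 1 := by
      simp; omega
    rw [this, List.replicate_succ, List.append_assoc]
    rfl
  | case2 l h =>
    rw [fPad, if_neg h]
    have : 32 - l.length = 0 := by omega
    simp [this]

theorem bitLength_le_32 (n : Int) (h0 : 0 < n) (h1 : n ≤ 2147483648) :
    PySem.Int.bitLength n ≤ 32 := by
  by_contra h
  have h2 := PySem.Int.two_pow_bitLength_le n (by omega)
  have h3 : (2 : Nat) ^ 32 ≤ 2 ^ (PySem.Int.bitLength n - 1) :=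
    Nat.pow_le_pow_right (by omega) (by omega)
  have h4 : n.natAbs ≤ 2147483648 := by omega
  have : (2:Nat) ^ 32 = 4294967296 := by norm_num
  omega

-- ===== VERDICT (by name: the statement is the Claim_ definition above) =====
theorem f_spec : Claim_equal_f := by
  intro n hdom
  have hb : -2147483648 ≤ n ∧ n ≤ 2147483648 := by
    simpa [Dom_f, pvDomInt] using hdom
  unfold Spec_f f_alt
  by_cases hle : n ≤ 0
  · rw [if_pos hle, f_eq]
    have : fBits n = [] := by rw [fBits, dif_neg (by omega)]
    rw [this, fPad_eq]
    decide
  · rw [if_neg hle]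
    have hw : max 32 (PySem.Int.bitLength n) = 32 :=
      Nat.max_eq_left (bitLength_le_32 n (by omega) hb.2)
    rw [hw, foldB_eq, f_eq, fPad_eq, pad_bits 32 n (by omega)
          (by norm_num; omega)]
    ring
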